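-- pv_equiv track=rewrite | github.com/geunkey/TIL | SWEA/220210/Flatten.py | get
-- ===== SOURCE A (Python) =====
-- def get(arr):
--     maxHeight = -1
--     minHeight = 101
--
--     for i in arr:
--         if i == 0 :
--             continue
--         if maxHeight < i:
--             maxHeight = i
--         if minHeight > i:
--             minHeight = i
--
--     return maxHeight, minHeight
-- ===== SOURCE B (Python) =====
-- def get(arr):
--     vals = [i for i in arr if i != 0]
--     return sorted([-1] + vals)[-1], sorted([101] + vals)[0]
-- ===== Notes on version B (the rewrite author's own statement) =====
-- stated objective: alternative
-- what changed: Replaces the fused single-pass max/min accumulator loop with two sort-then-pick-endpoint reductions: the nonzero values are filtered, sorted together with the -1 (resp. 101) sentinel, and the last (resp. first) element of the sorted list is the answer.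
import Mathlib
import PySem

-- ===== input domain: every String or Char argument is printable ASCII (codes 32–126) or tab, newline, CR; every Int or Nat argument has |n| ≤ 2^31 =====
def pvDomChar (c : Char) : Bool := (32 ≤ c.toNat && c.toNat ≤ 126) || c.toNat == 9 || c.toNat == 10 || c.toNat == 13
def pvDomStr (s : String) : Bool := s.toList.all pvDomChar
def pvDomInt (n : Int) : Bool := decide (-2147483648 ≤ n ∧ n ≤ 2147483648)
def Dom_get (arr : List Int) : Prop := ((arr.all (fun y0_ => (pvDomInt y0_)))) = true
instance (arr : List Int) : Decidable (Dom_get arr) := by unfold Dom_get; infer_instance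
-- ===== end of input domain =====

-- B replaces A's fused max/min accumulator loop with two sort-then-pick-endpoint
-- reductions over the nonzero values seeded with the -1/101 sentinels (alternative algorithm).


-- ===== PORT A =====
def get (arr : List Int) : Int × Int :=
  arr.foldl
    (fun (s : Int × Int) i =>
      if i == 0 then s
      else
        let s1 := if s.1 < i then (i, s.2) else s
        if s1.2 > i then (s1.1, i) else s1)
    (-1, 101)

-- ===== PORT B =====
-- The .getD 0 on the indexings is never exercised: both sorted lists are nonempty
-- (they contain the sentinel), so Python's [-1]/[0] indexings always succeed.
def get_alt (arr : List Int) : Int × Int :=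
  let vals := arr.filter (fun i => i != 0)
  ((PySem.List.pyGet? (PySem.List.sorted ((-1 : Int) :: vals) (fun y => y) false) (-1)).getD 0,
   (PySem.List.pyGet? (PySem.List.sorted ((101 : Int) :: vals) (fun y => y) false) 0).getD 0)

-- ===== PRECONDITION & SPEC =====
def Spec_get (arr : List Int) (out : Int × Int) : Prop := out = get_alt arr
instance (arr : List Int) (out : Int × Int) : Decidable (Spec_get arr out) := by unfold Spec_get; infer_instance

-- ===== CLAIM =====
def Claim_equal_get : Prop := ∀ (arr : List Int), Dom_get arr → Spec_get arr (get arr)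

-- ===== LEMMAS AND PROOFS =====
theorem get_step_zero (a b x : Int) (hx : x = 0) :
    (if x == 0 then (a, b)
     else
       let s1 := if (a, b).1 < x then (x, (a, b).2) else (a, b)
       if s1.2 > x then (s1.1, x) else s1) = (a, b) := by
  simp [hx]

theorem get_step_eq (a b x : Int) (hx : x ≠ 0) :
    (if x == 0 then (a, b)
     else
       let s1 := if (a, b).1 < x then (x, (a, b).2) else (a, b)
       if s1.2 > x then (s1.1, x) else s1) = (max a x, min b x) := by
  simp only [beq_iff_eq, if_neg hx]
  split_ifs <;> simp only [Prod.mk.injEq] <;> constructor <;> simp_all <;> omega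

theorem get_fold_eq (arr : List Int) : ∀ (a b : Int),
    arr.foldl
      (fun (s : Int × Int) i =>
        if i == 0 then s
        else
          let s1 := if s.1 < i then (i, s.2) else s
          if s1.2 > i then (s1.1, i) else s1)
      (a, b)
    = ((arr.filter (fun i => i != 0)).foldl max a,
       (arr.filter (fun i => i != 0)).foldl min b) := by
  induction arr with
  | nil => intro a b; simp
  | cons x t ih =>
    intro a b
    by_cases hx : x = 0
    · rw [List.foldl_cons, get_step_zero a b x hx, ih, List.filter_cons]
      simp [hx]
    · have hx' : (x != 0) = true := by simpa using hx
      rw [List.foldl_cons, get_step_eq a b x hx, ih, List.filter_cons]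
      simp [hx', List.foldl_cons]

-- last element of sorted (a :: l) is the running max
theorem sorted_last_eq_foldl_max (a : Int) (l : List Int) :
    (PySem.List.pyGet? (PySem.List.sorted (a :: l) (fun y => y) false) (-1)).getD 0
      = l.foldl max a := by
  set s := PySem.List.sorted (a :: l) (fun y => y) false with hs
  have hperm : s.Perm (a :: l) := PySem.List.sorted_perm _ _ _
  have hne : s ≠ [] := by
    intro h; exact (List.cons_ne_nil a l) (List.Perm.nil_eq (h ▸ hperm)).symm
  rw [PySem.List.pyGet?_neg_one, List.getLast?_eq_some_getLast hne, Option.getD_some]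
  have hmax : PySem.List.max? (a :: l) (fun y => y) = some (l.foldl max a) :=
    PySem.List.max?_id_cons a l
  have hm_mem : l.foldl max a ∈ (a :: l) := PySem.List.max?_mem hmax
  have hub : ∀ y ∈ (a :: l), y ≤ l.foldl max a := by
    intro y hy; exact PySem.List.max?_isMax hmax y hy
  have hL_mem : s.getLast hne ∈ (a :: l) := hperm.mem_iff.mp (List.getLast_mem hne)
  have hL_le : s.getLast hne ≤ l.foldl max a := hub _ hL_mem
  have hm_in_s : l.foldl max a ∈ s := hperm.mem_iff.mpr hm_mem
  obtain ⟨p, hp, hpe⟩ := List.mem_iff_getElem.mp hm_in_s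
  have hlast : s.getLast hne = s[s.length - 1] := List.getLast_eq_getElem hne
  have hq : s.length - 1 < (PySem.List.sorted (a :: l) (fun y => y)).length := by
    simp only [← hs]; omega
  have hmono := PySem.List.key_sorted_getElem_mono (a :: l) (fun y => y)
      (p := p) (q := s.length - 1) (by omega) hq
  simp only [← hs, hpe] at hmono
  rw [← hlast] at hmono
  omega

-- head of sorted (a :: l) is the running min
theorem sorted_head_eq_foldl_min (a : Int) (l : List Int) :
    (PySem.List.pyGet? (PySem.List.sorted (a :: l) (fun y => y) false) 0).getD 0
      = l.foldl min a := by
  set s := PySem.List.sorted (a :: l) (fun y => y) false with hs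
  have hperm : s.Perm (a :: l) := PySem.List.sorted_perm _ _ _
  have hne : s ≠ [] := by
    intro h; exact (List.cons_ne_nil a l) (List.Perm.nil_eq (h ▸ hperm)).symm
  obtain ⟨m, t, hst⟩ := List.exists_cons_of_ne_nil hne
  have hmin : PySem.List.min? (a :: l) (fun y => y) = some (l.foldl min a) :=
    PySem.List.min?_id_cons a l
  have hm_mem : l.foldl min a ∈ (a :: l) := PySem.List.min?_mem hmin
  have hlb : ∀ y ∈ (a :: l), l.foldl min a ≤ y := by
    intro y hy; exact PySem.List.min?_isMin hmin y hy
  have hseq : PySem.List.sorted (a :: l) (fun y => y) false = m :: t := by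
    rw [← hs]; exact hst
  have hhead_le : ∀ y ∈ (a :: l), m ≤ y := PySem.List.key_head_sorted_le (a :: l) (fun y => y) hseq
  have h1 : m ≤ l.foldl min a := hhead_le _ hm_mem
  have h2 : l.foldl min a ≤ m := by
    have : m ∈ (a :: l) := hperm.mem_iff.mp (hst ▸ List.mem_cons_self)
    exact hlb _ this
  have : m = l.foldl min a := le_antisymm h1 h2
  rw [hst]
  simp [PySem.List.pyGet?, PySem.List.pyIdx?, this]

-- ===== VERDICT =====
theorem get_spec : Claim_equal_get := by
  intro arr _
  unfold Spec_get _root_.get get_alt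
  simp only [get_fold_eq, sorted_last_eq_foldl_max, sorted_head_eq_foldl_min]
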